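-- pv_equiv track=rewrite | github.com/nkukarl/lintcode | Q179 Update Bits.py | updateBits
-- ===== SOURCE A (Python) =====
-- def updateBits(n, m, i, j):
--     if m < 0:
--         M = bin((1 << 32) + m)[2:]
--     else:
--         M = bin(m)[2:]
--     if n < 0:
--         N = bin((1 << 32) + n)[2:]
--     else:
--         tmp = bin(n)[2:]
--         N = '0' * (32 - len(tmp)) + tmp
--     M, N = list(M), list(N)
--     N.reverse()
--     for k in range(i, j + 1):
--         if M:
--             tmp = M.pop()
--         else:
--             tmp = '0'
--         N[k] = tmp
--     N.reverse()
--     N = ''.join(N)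
--     if N[0] == '1' and len(N) == 32:
--         return int(N, 2) - 2 ** 32
--     return int(N, 2)
-- ===== SOURCE B (Python) =====
-- def updateBits(n, m, i, j):
--     TWO32 = 1 << 32
--     width = j - i + 1
--     if width <= 0:
--         v = n % TWO32
--     else:
--         lo = n % TWO32
--         p = 1 << i
--         q = 1 << width
--         v = lo - (lo // p % q) * p + (m % q) * p
--     return v - TWO32 if v >= 1 << 31 else v
-- ===== Notes on version B (the rewrite author's own statement) =====
-- stated objective: simpler
-- what changed: Replaced A's binary-string construction (build 32-char two's-complement strings, reverse, pop/splice characters in a loop, re-parse with int(.,2)) by direct modular arithmetic: clear the i..j field of n mod 2^32 and add m's low bits shifted into place, then signed-reinterpret.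
-- outside the precondition, e.g. on updateBits(0, 1, -1, -1): A returns -2147483648, B raises ValueError
import Mathlib
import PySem

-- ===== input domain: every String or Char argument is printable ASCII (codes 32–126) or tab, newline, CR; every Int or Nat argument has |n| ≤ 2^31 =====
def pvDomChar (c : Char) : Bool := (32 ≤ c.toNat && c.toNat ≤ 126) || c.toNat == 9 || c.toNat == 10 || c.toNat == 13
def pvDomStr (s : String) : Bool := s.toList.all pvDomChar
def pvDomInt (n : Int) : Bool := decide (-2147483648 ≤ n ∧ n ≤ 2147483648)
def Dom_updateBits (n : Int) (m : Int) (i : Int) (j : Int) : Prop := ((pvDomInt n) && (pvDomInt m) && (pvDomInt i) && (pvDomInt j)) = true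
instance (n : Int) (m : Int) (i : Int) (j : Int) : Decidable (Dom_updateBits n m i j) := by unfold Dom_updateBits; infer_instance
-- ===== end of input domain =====

-- B replaces A's binary-string splicing (build 32-char two's-complement strings, reverse,
-- pop/set characters, re-parse with int(.,2)) by direct modular arithmetic on n mod 2^32.

-- ===== PORT A =====
-- bin(x)[2:] for x > 0, digit by digit (most significant first)
def binGo (x : Nat) : List Char :=
  if x = 0 then [] else binGo (x / 2) ++ [if x % 2 = 1 then '1' else '0']

-- bin(x)[2:] for x ≥ 0
def binChars (x : Nat) : List Char := if x = 0 then ['0'] else binGo x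

-- int(s, 2); exact for the '0'/'1' strings A builds
def binToNat (cs : List Char) : Nat := cs.foldl (fun a c => 2 * a + (if c = '1' then 1 else 0)) 0

-- Python `N[k] = c` with possibly negative k; Python raises IndexError out of range
-- (those inputs are outside Pre_updateBits); this total model leaves the list unchanged there.
def pySetChar (xs : List Char) (k : Int) (c : Char) : List Char :=
  let idx := if k < 0 then k + xs.length else k
  if 0 ≤ idx ∧ idx < xs.length then xs.set idx.toNat c else xs

-- the for-loop of A: pop the last char of M (or '0') and write it at position k
def loopA : List Int → List Char → List Char → List Char × List Char
  | [], M, N => (M, N)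
  | k :: ks, M, N =>
    match M.getLast? with
    | some c => loopA ks M.dropLast (pySetChar N k c)
    | none   => loopA ks M (pySetChar N k '0')

def updateBits (n : Int) (m : Int) (i : Int) (j : Int) : Int :=
  -- (2^32 + m).toNat is bin((1<<32)+m) for the m > -2^32 the domain admits
  let M : List Char := if m < 0 then binChars ((2 ^ 32 + m).toNat) else binChars m.toNat
  let N : List Char :=
    if n < 0 then binChars ((2 ^ 32 + n).toNat)
    else
      let tmp := binChars n.toNat
      List.replicate (32 - tmp.length) '0' ++ tmp
  let st := loopA (PySem.List.pyRange i (j + 1) 1) M N.reverse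
  let Nf := st.2.reverse
  if Nf.headD ' ' = '1' ∧ Nf.length = 32 then (binToNat Nf : Int) - 2 ^ 32
  else (binToNat Nf : Int)

-- ===== PORT B =====
def updateBits_alt (n : Int) (m : Int) (i : Int) (j : Int) : Int :=
  let B : Int := 2 ^ 32
  let width := j - i + 1
  let v : Int :=
    if width ≤ 0 then n % B
    else
      -- 1 << i and 1 << width; Python raises on a negative shift, so Pre_ gives 0 ≤ i here
      let lo := n % B
      let p : Int := 2 ^ i.toNat
      let q : Int := 2 ^ width.toNat
      lo - (PySem.Int.floordiv lo p % q) * p + (m % q) * p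
  if v ≥ 2 ^ 31 then v - B else v

-- ===== PRECONDITION & SPEC =====
-- Pre_ excludes j ≥ 32 (A raises IndexError) and negative bit positions i with i ≤ j:
-- there A still returns a value, via Python's negative-index wraparound into the HIGH bits
-- of the reversed list — an accident of the list representation, outside the natural domain
-- of bit positions — and B's shift 1 << i raises ValueError there.
def Pre_updateBits (n : Int) (m : Int) (i : Int) (j : Int) : Prop :=
  j < i ∨ (0 ≤ i ∧ j ≤ 31)
instance (n : Int) (m : Int) (i : Int) (j : Int) : Decidable (Pre_updateBits n m i j) := by
  unfold Pre_updateBits; infer_instance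

def pvWitness_updateBits : Int × Int × Int × Int := (1024, 21, 2, 6)

def Spec_updateBits (n : Int) (m : Int) (i : Int) (j : Int) (out : Int) : Prop := out = updateBits_alt n m i j
instance (n : Int) (m : Int) (i : Int) (j : Int) (out : Int) : Decidable (Spec_updateBits n m i j out) := by unfold Spec_updateBits; infer_instance

-- ===== CLAIM (what is proved, stated in full; the proofs are below) =====
def Claim_equal_updateBits : Prop := ∀ (n : Int) (m : Int) (i : Int) (j : Int), Dom_updateBits n m i j → Pre_updateBits n m i j → Spec_updateBits n m i j (updateBits n m i j)

-- ===== LEMMAS AND PROOFS =====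

-- the same digits, least significant first
def lsbChars (x : Nat) : List Char :=
  if x = 0 then [] else (if x % 2 = 1 then '1' else '0') :: lsbChars (x / 2)

def bitChar (b : Bool) : Char := if b then '1' else '0'

theorem binGo_eq_reverse (x : Nat) : binGo x = (lsbChars x).reverse := by
  induction x using Nat.strong_induction_on with
  | _ x ih =>
    rw [binGo, lsbChars]
    by_cases h : x = 0
    · simp [h]
    · simp only [h, if_false, List.reverse_cons]
      rw [ih (x / 2) (Nat.div_lt_self (Nat.pos_of_ne_zero h) one_lt_two)]

theorem lsbChars_getD (x t : Nat) : (lsbChars x).getD t '0' = bitChar (x.testBit t) := by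
  induction t generalizing x with
  | zero =>
    rw [lsbChars]
    by_cases h : x = 0
    · simp [h, bitChar]
    · simp [h, bitChar, Nat.testBit_zero]
  | succ t ih =>
    rw [lsbChars]
    by_cases h : x = 0
    · subst h; simp [bitChar, Nat.zero_testBit]
    · simp only [h, if_false, List.getD_cons_succ]
      rw [ih, Nat.testBit_succ]

theorem lsbChars_len_lt (len x : Nat) (h : 2 ^ len ≤ x) : len < (lsbChars x).length := by
  induction len generalizing x with
  | zero =>
    rw [lsbChars]
    have : x ≠ 0 := by omega
    simp [this]
  | succ len ih =>
    rw [lsbChars]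
    have hx : x ≠ 0 := by
      have : 0 < 2 ^ (len + 1) := Nat.two_pow_pos _
      omega
    simp only [hx, if_false, List.length_cons]
    have : 2 ^ len ≤ x / 2 := by
      rw [Nat.le_div_iff_mul_le (by norm_num)]
      rw [pow_succ] at h; omega
    have := ih (x / 2) this
    omega

theorem pad_lemma (len : Nat) : ∀ x : Nat, x < 2 ^ len →
    lsbChars x ++ List.replicate (len - (lsbChars x).length) '0'
      = (List.range len).map (fun k => bitChar (x.testBit k)) := by
  induction len with
  | zero =>
    intro x hx
    interval_cases x
    simp [lsbChars]
  | succ len ih =>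
    intro x hx
    rw [List.range_succ_eq_map, List.map_cons, List.map_map]
    rw [lsbChars]
    by_cases h : x = 0
    · subst h
      simp only [if_true, List.nil_append, List.length_nil, Nat.sub_zero]
      have h0 : ∀ k : Nat, bitChar (Nat.testBit 0 k) = '0' := by
        intro k; simp [bitChar, Nat.zero_testBit]
      simp [Nat.zero_testBit, bitChar, List.map_const', List.replicate_succ, Function.comp_def]
    · simp only [h, if_false, List.length_cons, List.cons_append]
      have hx2 : x / 2 < 2 ^ len := by
        rw [Nat.div_lt_iff_lt_mul (by norm_num)]
        rw [pow_succ] at hx; omega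
      have := ih (x / 2) hx2
      have hsub : len + 1 - ((lsbChars (x / 2)).length + 1) = len - (lsbChars (x / 2)).length := by omega
      rw [hsub, this]
      congr 1
      · simp [bitChar, Nat.testBit_zero]
      · apply List.map_congr_left
        intro k _
        simp [Function.comp, Nat.testBit_succ]

theorem binChars_reverse_getD (x t : Nat) :
    (binChars x).reverse.getD t '0' = bitChar (x.testBit t) := by
  rw [binChars]
  by_cases h : x = 0
  · subst h; cases t <;> simp [bitChar, Nat.zero_testBit]
  · simp only [h, if_false, binGo_eq_reverse, List.reverse_reverse]
    exact lsbChars_getD x t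

theorem getD_tail (l : List Char) (t : Nat) : l.tail.getD t '0' = l.getD (t + 1) '0' := by
  cases l <;> simp

theorem loopA_step (k : Int) (ks : List Int) (M N : List Char) :
    loopA (k :: ks) M N = loopA ks M.dropLast (pySetChar N k (M.reverse.getD 0 '0')) := by
  rcases h : M.getLast? with _ | c
  · have hM : M = [] := List.getLast?_eq_none_iff.mp h
    subst hM
    simp [loopA]
  · have hh : M.reverse.head? = some c := by rw [List.head?_reverse]; exact h
    have hhd : M.reverse.getD 0 '0' = c := by
      cases hrev : M.reverse with
      | nil => rw [hrev] at hh; simp at hh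
      | cons d ds => rw [hrev] at hh; simp at hh; simp [hh]
    simp only [List.getD_eq_getElem?_getD] at hhd
    simp [loopA, h, hhd]

theorem getD_reverse_dropLast (M : List Char) (t : Nat) :
    M.dropLast.reverse.getD t '0' = M.reverse.getD (t + 1) '0' := by
  rw [← getD_tail]
  congr 1
  rcases h : M.reverse with _ | ⟨d, ds⟩
  · have : M = [] := by simpa using congrArg List.reverse h
    simp [this]
  · have hM : M = (d :: ds).reverse := by
      have := congrArg List.reverse h; simpa using this
    subst hM
    simp

theorem set_take (R : List Char) (a : Nat) (c : Char) (h : a < R.length) :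
    (R.set a c).take (a + 1) = R.take a ++ [c] := by
  induction R generalizing a with
  | nil => simp at h
  | cons d ds ih =>
    cases a with
    | zero => simp
    | succ a =>
      simp only [List.set_cons_succ, List.take_succ_cons]
      rw [ih a (by simpa using h)]
      simp

theorem set_drop (R : List Char) (a k : Nat) (c : Char) (h : a < k) :
    (R.set a c).drop k = R.drop k := by
  induction R generalizing a k with
  | nil => simp
  | cons d ds ih =>
    cases a with
    | zero => cases k with
      | zero => omega
      | succ k => simp
    | succ a =>
      cases k with
      | zero => omega
      | succ k =>
        simp only [List.set_cons_succ, List.drop_succ_cons]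
        exact ih a k (by omega)

theorem loopA_main (w : Nat) : ∀ (a : Nat) (M R : List Char), a + w ≤ R.length →
    (loopA (PySem.List.pyRange (a : Int) ((a : Int) + (w : Int)) 1) M R).2
      = R.take a ++ (List.range w).map (fun t => M.reverse.getD t '0') ++ R.drop (a + w) := by
  induction w with
  | zero =>
    intro a M R _
    rw [show ((a : Int) + (0 : Nat)) = (a : Int) by push_cast; ring]
    rw [PySem.List.pyRange_one_eq_nil le_rfl]
    simp [loopA]
  | succ w ih =>
    intro a M R hlen
    have hlt : (a : Int) < (a : Int) + ((w + 1 : Nat) : Int) := by push_cast; omega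
    rw [PySem.List.pyRange_one_cons hlt, loopA_step]
    have haR : a < R.length := by omega
    have hset : pySetChar R (a : Int) (M.reverse.getD 0 '0') = R.set a (M.reverse.getD 0 '0') := by
      unfold pySetChar
      have h0 : ¬ ((a : Int) < 0) := by omega
      simp only [h0, if_false]
      rw [if_pos (by constructor <;> [omega; exact_mod_cast by omega])]
      norm_num
    rw [hset]
    have harg : ((a : Int) + 1) = (((a + 1 : Nat) : Int)) := by push_cast; ring
    have harg2 : ((a : Int) + ((w + 1 : Nat) : Int)) = (((a + 1 : Nat) : Int) + ((w : Nat) : Int)) := by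
      push_cast; ring
    rw [harg, harg2, ih (a + 1) M.dropLast (R.set a (M.reverse.getD 0 '0')) (by simpa using by omega)]
    rw [set_take R a _ haR, set_drop R a _ _ (by omega)]
    rw [List.range_succ_eq_map, List.map_cons, List.map_map]
    have hmaps : (List.range w).map ((fun t => M.reverse.getD t '0') ∘ Nat.succ)
        = (List.range w).map (fun t => M.dropLast.reverse.getD t '0') := by
      apply List.map_congr_left
      intro t _
      have hgd := (getD_reverse_dropLast M t).symm
      simp only [List.getD_eq_getElem?_getD] at hgd
      simpa [Function.comp] using hgd
    rw [← hmaps]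
    have hidx : a + 1 + w = a + (w + 1) := by omega
    rw [hidx]
    simp [List.append_assoc]

def vOf (R : List Char) : Nat := R.foldr (fun c a => 2 * a + (if c = '1' then 1 else 0)) 0

theorem binToNat_reverse (R : List Char) : binToNat R.reverse = vOf R := by
  rw [binToNat, vOf, List.foldl_reverse]

theorem vOf_append (A B : List Char) : vOf (A ++ B) = vOf A + 2 ^ A.length * vOf B := by
  induction A with
  | nil => simp [vOf]
  | cons c cs ih => simp [vOf, List.foldr] at ih ⊢; rw [ih]; ring

theorem mod_two_pow_succ (x len : Nat) :
    x % 2 ^ (len + 1) = x % 2 + 2 * (x / 2 % 2 ^ len) := by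
  have a := Nat.mod_add_div x 2
  obtain ⟨q, R, hq, hR⟩ : ∃ q R, x / 2 = 2 ^ len * q + R ∧ R < 2 ^ len :=
    ⟨x / 2 / 2 ^ len, x / 2 % 2 ^ len, (Nat.div_add_mod _ _).symm, Nat.mod_lt _ (Nat.two_pow_pos len)⟩
  have hRmod : x / 2 % 2 ^ len = R := by
    rw [hq, Nat.mul_add_mod]; exact Nat.mod_eq_of_lt hR
  rw [hq] at a
  have hx : x = x % 2 + 2 * R + (2 * 2 ^ len) * q := by
    calc x = x % 2 + 2 * (2 ^ len * q + R) := a.symm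
    _ = x % 2 + 2 * R + (2 * 2 ^ len) * q := by ring
  have hp : 2 ^ (len + 1) = 2 * 2 ^ len := by ring
  rw [hp, hRmod]
  conv_lhs => rw [hx]
  rw [Nat.add_mul_mod_self_left]
  have h1 : x % 2 < 2 := Nat.mod_lt _ (by norm_num)
  exact Nat.mod_eq_of_lt (by omega)

theorem vOf_range_map (len : Nat) : ∀ x : Nat,
    vOf ((List.range len).map (fun k => bitChar (x.testBit k))) = x % 2 ^ len := by
  induction len with
  | zero => intro x; simp [vOf, Nat.mod_one]
  | succ len ih =>
    intro x
    rw [List.range_succ_eq_map, List.map_cons, List.map_map]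
    have hmap : (List.range len).map ((fun k => bitChar (x.testBit k)) ∘ Nat.succ)
        = (List.range len).map (fun k => bitChar ((x / 2).testBit k)) := by
      apply List.map_congr_left; intro k _
      simp [Function.comp, Nat.testBit_succ]
    simp only [vOf, List.foldr_cons] at *
    rw [hmap, ih (x / 2)]
    rw [mod_two_pow_succ x len]
    rcases Nat.mod_two_eq_zero_or_one x with hp | hp <;>
      simp [bitChar, Nat.testBit_zero, hp] <;> omega

theorem vOf_lt (R : List Char) (h : ∀ c ∈ R, c = '0' ∨ c = '1') : vOf R < 2 ^ R.length := by
  induction R with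
  | nil => simp [vOf]
  | cons c cs ih =>
    have h1 := h c (by simp)
    have h2 := ih (fun c hc => h c (by simp [hc]))
    simp [vOf, List.foldr] at h2 ⊢
    rcases h1 with h1 | h1 <;> simp [h1, pow_succ] <;> omega

theorem sign_iff (R : List Char) (hlen : R.length = 32) (hbin : ∀ c ∈ R, c = '0' ∨ c = '1') :
    (R.reverse.headD ' ' = '1') ↔ 2 ^ 31 ≤ vOf R := by
  rcases List.eq_nil_or_concat R with h | ⟨S, c, h⟩
  · subst h; simp at hlen
  · subst h
    have hS : S.length = 31 := by simpa using hlen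
    have hc : c = '0' ∨ c = '1' := hbin c (by simp)
    have hSlt : vOf S < 2 ^ 31 := by
      have := vOf_lt S (fun d hd => hbin d (by simp [hd]))
      rwa [hS] at this
    rw [List.concat_eq_append] at *
    rw [vOf_append]
    rw [List.reverse_append]
    simp only [List.reverse_singleton, List.singleton_append, List.headD_cons, hS]
    have h0 : vOf ['0'] = 0 := rfl
    have h1 : vOf ['1'] = 1 := rfl
    rcases hc with hc | hc <;> subst hc <;> simp [h0, h1] <;> omega

theorem bitChar_cases (b : Bool) : bitChar b = '0' ∨ bitChar b = '1' := by
  cases b <;> simp [bitChar]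

theorem padded_eq (x : Nat) (hx : x < 2 ^ 32) :
    (List.replicate (32 - (binChars x).length) '0' ++ binChars x).reverse
      = (List.range 32).map (fun k => bitChar (x.testBit k)) := by
  rw [← pad_lemma 32 x hx]
  by_cases h : x = 0
  · subst h
    simp [binChars, lsbChars]
  · rw [binChars, if_neg h, binGo_eq_reverse]
    simp [List.reverse_replicate]

theorem full_eq (x : Nat) (hlo : 2 ^ 31 ≤ x) (hhi : x < 2 ^ 32) :
    (binChars x).reverse = (List.range 32).map (fun k => bitChar (x.testBit k)) := by
  have hx0 : x ≠ 0 := by have := Nat.two_pow_pos 31; omega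
  rw [binChars, if_neg hx0, binGo_eq_reverse, List.reverse_reverse]
  have hlen : 31 < (lsbChars x).length := lsbChars_len_lt 31 x hlo
  have := pad_lemma 32 x hhi
  rwa [show 32 - (lsbChars x).length = 0 by omega, List.replicate_zero, List.append_nil] at this

theorem decomp (x a wn : Nat) :
    x = x % 2 ^ a + 2 ^ a * (x / 2 ^ a % 2 ^ wn) + 2 ^ (a + wn) * (x / 2 ^ (a + wn)) := by
  have h1 := Nat.div_add_mod x (2 ^ a)
  obtain ⟨Q, R2, hQ, hR2⟩ : ∃ Q R2, x / 2 ^ a = 2 ^ wn * Q + R2 ∧ R2 < 2 ^ wn :=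
    ⟨x / 2 ^ a / 2 ^ wn, x / 2 ^ a % 2 ^ wn, (Nat.div_add_mod _ _).symm,
      Nat.mod_lt _ (Nat.two_pow_pos wn)⟩
  have hRm : x / 2 ^ a % 2 ^ wn = R2 := by
    rw [hQ, Nat.mul_add_mod]; exact Nat.mod_eq_of_lt hR2
  have hQd : x / 2 ^ (a + wn) = Q := by
    rw [pow_add, ← Nat.div_div_eq_div_mul, hQ, Nat.mul_add_div (Nat.two_pow_pos wn),
      Nat.div_eq_of_lt hR2]
    omega
  rw [hRm, hQd]
  calc x = 2 ^ a * (x / 2 ^ a) + x % 2 ^ a := h1.symm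
    _ = 2 ^ a * (2 ^ wn * Q + R2) + x % 2 ^ a := by rw [hQ]
    _ = x % 2 ^ a + 2 ^ a * R2 + 2 ^ (a + wn) * Q := by rw [pow_add]; ring

theorem vOf_spliced (x mm a wn : Nat) (h32 : a + wn ≤ 32) (hx : x < 2 ^ 32) :
    vOf (((List.range 32).map (fun k => bitChar (x.testBit k))).take a
        ++ (List.range wn).map (fun t => bitChar (mm.testBit t))
        ++ ((List.range 32).map (fun k => bitChar (x.testBit k))).drop (a + wn))
      = x % 2 ^ a + 2 ^ a * (mm % 2 ^ wn) + 2 ^ (a + wn) * (x / 2 ^ (a + wn)) := by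
  set f : Nat → Char := fun k => bitChar (x.testBit k) with hf
  have hsplit : (List.range 32).map f
      = (List.range a).map f ++ (List.range wn).map (fun t => f (a + t))
        ++ (List.range (32 - (a + wn))).map (fun t => f ((a + wn) + t)) := by
    rw [show 32 = (a + wn) + (32 - (a + wn)) by omega, List.range_add, List.map_append,
      List.map_map, List.range_add, List.map_append, List.map_map]
    simp [Function.comp_def, List.append_assoc]
  have hlen1 : ((List.range a).map f).length = a := by simp
  have hlen2 : ((List.range wn).map (fun t => f (a + t))).length = wn := by simp
  have htake : ((List.range 32).map f).take a = (List.range a).map f := by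
    rw [hsplit, List.append_assoc, List.take_append_of_le_length (by simp),
      List.take_of_length_le (by simp)]
  have hdrop : ((List.range 32).map f).drop (a + wn)
      = (List.range (32 - (a + wn))).map (fun t => f ((a + wn) + t)) := by
    rw [hsplit]
    exact List.drop_left' (by simp)
  rw [htake, hdrop, vOf_append, vOf_append]
  have hthird : (List.range (32 - (a + wn))).map (fun t => f ((a + wn) + t))
      = (List.range (32 - (a + wn))).map (fun t => bitChar ((x / 2 ^ (a + wn)).testBit t)) := by
    apply List.map_congr_left
    intro t _
    rw [hf]
    simp only []
    rw [Nat.testBit_div_two_pow, Nat.add_comm t (a + wn)]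
  rw [hthird, vOf_range_map, vOf_range_map, vOf_range_map]
  have hdivlt : x / 2 ^ (a + wn) < 2 ^ (32 - (a + wn)) := by
    rw [Nat.div_lt_iff_lt_mul (Nat.two_pow_pos _), ← pow_add]
    calc x < 2 ^ 32 := hx
    _ ≤ 2 ^ (32 - (a + wn) + (a + wn)) := by apply Nat.pow_le_pow_right <;> omega
  rw [Nat.mod_eq_of_lt hdivlt]
  simp

theorem bin_map (l : List Nat) (g : Nat → Bool) : ∀ c ∈ l.map (fun k => bitChar (g k)), c = '0' ∨ c = '1' := by
  intro c hc
  simp only [List.mem_map] at hc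
  obtain ⟨k, _, hk⟩ := hc
  rw [← hk]; exact bitChar_cases _

-- ===== VERDICT (by name: the statement is the Claim_ definition above) =====
theorem updateBits_spec : Claim_equal_updateBits := by
  intro n m i j hdom hpre
  unfold Spec_updateBits
  have hbounds : -2147483648 ≤ n ∧ n ≤ 2147483648 ∧ -2147483648 ≤ m ∧ m ≤ 2147483648 := by
    simp [Dom_updateBits, pvDomInt] at hdom
    tauto
  obtain ⟨hn1, hn2, hm1, hm2⟩ := hbounds
  -- the 32-bit nonnegative residues of n and m
  set x : Nat := (n % 2 ^ 32).toNat with hxdef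
  set mm : Nat := (m % 2 ^ 32).toNat with hmmdef
  have hxcast : (x : Int) = n % 2 ^ 32 := by
    rw [hxdef]; apply Int.toNat_of_nonneg; omega
  have hmmcast : (mm : Int) = m % 2 ^ 32 := by
    rw [hmmdef]; apply Int.toNat_of_nonneg; omega
  have hxlt : x < 2 ^ 32 := by omega
  have h32 : (2 : Int) ^ 32 = 4294967296 := by norm_num
  -- the two character lists A builds
  have hMA : (if m < 0 then binChars ((2 ^ 32 + m).toNat) else binChars m.toNat) = binChars mm := by
    by_cases hm : m < 0
    · rw [if_pos hm]
      congr 1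
      rw [hmmdef]
      congr 1
      omega
    · rw [if_neg hm]
      congr 1
      rw [hmmdef]
      congr 1
      omega
  have hNrev : (if n < 0 then binChars ((2 ^ 32 + n).toNat)
      else List.replicate (32 - (binChars n.toNat).length) '0' ++ binChars n.toNat).reverse
        = (List.range 32).map (fun k => bitChar (x.testBit k)) := by
    by_cases hn : n < 0
    · rw [if_pos hn]
      have hx' : (2 ^ 32 + n).toNat = x := by rw [hxdef]; congr 1; omega
      rw [hx']
      exact full_eq x (by omega) hxlt
    · rw [if_neg hn]
      have hx' : n.toNat = x := by rw [hxdef]; congr 1; omega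
      rw [hx']
      exact padded_eq x hxlt
  unfold updateBits updateBits_alt
  dsimp only
  rw [hMA, hNrev]
  set Rn : List Char := (List.range 32).map (fun k => bitChar (x.testBit k)) with hRn
  by_cases hij : j < i
  · -- empty range: the loop does nothing
    rw [PySem.List.pyRange_one_eq_nil (by omega), if_pos (show j - i + 1 ≤ 0 by omega)]
    have hloop : loopA [] (binChars mm) Rn = (binChars mm, Rn) := rfl
    rw [hloop]
    have hbtn : binToNat Rn.reverse = x := by
      rw [binToNat_reverse, hRn, vOf_range_map, Nat.mod_eq_of_lt hxlt]
    have hsign := sign_iff Rn (by simp [hRn]) (by rw [hRn]; exact bin_map _ _)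
    have hvOf : vOf Rn = x := by rw [hRn, vOf_range_map, Nat.mod_eq_of_lt hxlt]
    rw [hvOf] at hsign
    have hlen : Rn.reverse.length = 32 := by simp [hRn]
    by_cases hs : 2 ^ 31 ≤ x
    · rw [if_pos ⟨hsign.mpr hs, hlen⟩, if_pos (by rw [← hxcast] at *; push_cast; omega)]
      rw [hbtn, ← hxcast]
    · rw [if_neg (by rw [hlen]; intro hcon; exact hs (hsign.mp hcon.1)),
        if_neg (by rw [← hxcast]; push_cast; omega)]
      rw [hbtn, ← hxcast]
  · obtain ⟨hi0, hj31⟩ : 0 ≤ i ∧ j ≤ 31 := by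
      rcases hpre with h | h
      · omega
      · exact h
    set a : Nat := i.toNat with hadef
    set wn : Nat := (j - i + 1).toNat with hwdef
    have hacast : (a : Int) = i := Int.toNat_of_nonneg hi0
    have hwcast : (wn : Int) = j - i + 1 := Int.toNat_of_nonneg (by omega)
    have hw1 : 1 ≤ wn := by omega
    have haw : a + wn ≤ 32 := by omega
    have hrange : PySem.List.pyRange i (j + 1) 1
        = PySem.List.pyRange (a : Int) ((a : Int) + (wn : Int)) 1 := by
      rw [hacast, hwcast]; congr 1; ring
    rw [hrange, loopA_main wn a (binChars mm) Rn (by simp [hRn]; omega)]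
    have hseg : (List.range wn).map (fun t => (binChars mm).reverse.getD t '0')
        = (List.range wn).map (fun t => bitChar (mm.testBit t)) := by
      apply List.map_congr_left
      intro t _
      exact binChars_reverse_getD mm t
    rw [hseg]
    set R' : List Char := Rn.take a ++ (List.range wn).map (fun t => bitChar (mm.testBit t))
        ++ Rn.drop (a + wn) with hR'
    have hvOf : vOf R' = x % 2 ^ a + 2 ^ a * (mm % 2 ^ wn) + 2 ^ (a + wn) * (x / 2 ^ (a + wn)) := by
      rw [hR', hRn]
      exact vOf_spliced x mm a wn haw hxlt
    have hlenR : R'.length = 32 := by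
      rw [hR']
      simp [hRn]
      omega
    have hbinR : ∀ c ∈ R', c = '0' ∨ c = '1' := by
      intro c hc
      rw [hR'] at hc
      rcases List.mem_append.mp hc with hc | hc
      · rcases List.mem_append.mp hc with hc | hc
        · exact bin_map _ _ c (by rw [hRn] at hc; exact List.mem_of_mem_take hc)
        · exact bin_map _ _ c hc
      · exact bin_map _ _ c (by rw [hRn] at hc; exact List.mem_of_mem_drop hc)
    have hsign := sign_iff R' hlenR hbinR
    have hbtn : binToNat R'.reverse = vOf R' := binToNat_reverse R'
    have hlen2 : R'.reverse.length = 32 := by rw [List.length_reverse, hlenR]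
    -- B's value
    rw [if_neg (show ¬ (j - i + 1 ≤ 0) by omega)]
    have hpq : (0 : Int) < 2 ^ a := by positivity
    have hfd : PySem.Int.floordiv (n % 2 ^ 32) ((2 : Int) ^ a) = ((x / 2 ^ a : Nat) : Int) := by
      rw [PySem.Int.floordiv_eq_ediv_of_pos hpq, ← hxcast]
      push_cast
      rfl
    have hmq : m % (2 : Int) ^ wn = ((mm % 2 ^ wn : Nat) : Int) := by
      have hdvd : ((2 : Int) ^ wn) ∣ ((2 : Int) ^ 32) := pow_dvd_pow 2 (by omega)
      rw [← Int.emod_emod_of_dvd m hdvd, ← hmmcast]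
      push_cast
      rfl
    have hxq : ((x / 2 ^ a : Nat) : Int) % (2 : Int) ^ wn = ((x / 2 ^ a % 2 ^ wn : Nat) : Int) := by
      push_cast
      rfl
    rw [hfd, hmq, hxq, ← hxcast]
    have hveq : ((vOf R' : Nat) : Int)
        = (x : Int) - ((x / 2 ^ a % 2 ^ wn : Nat) : Int) * 2 ^ a + ((mm % 2 ^ wn : Nat) : Int) * 2 ^ a := by
      rw [hvOf]
      have hd := decomp x a wn
      push_cast
      nth_rewrite 3 [hd]
      push_cast
      ring
    by_cases hs : 2 ^ 31 ≤ vOf R'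
    · rw [if_pos ⟨hsign.mpr hs, hlen2⟩, if_pos (by rw [← hveq]; push_cast; omega)]
      rw [hbtn, hveq]
    · rw [if_neg (by rw [hlen2]; intro hcon; exact hs (hsign.mp hcon.1)),
        if_neg (by rw [← hveq]; push_cast; omega)]
      rw [hbtn, hveq]
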